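-- pv_equiv track=rewrite | github.com/developer-kush/advent_of_code | 2025/06.py | format_inp
-- ===== SOURCE A (Python) =====
-- def format_inp(inps):
--     tp = list(zip(*inps))
--     joined = ["".join(item).strip() for item in tp]
--     res = []
--     row = []
--     for item in joined:
--         if item: row.append(int(item))
--         else:
--             res.append(row)
--             row = []
--     res.append(row)
--     return res
-- ===== SOURCE B (Python) =====
-- def format_inp(inps):
--     tp = list(zip(*inps))
--     joined = ["".join(item).strip() for item in tp]
--     res = [[]]
--     for s in reversed(joined):
--         if s:
--             res[0].insert(0, int(s))
--         else:
--             res.insert(0, [])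
--     return res
-- ===== Notes on version B (the rewrite author's own statement) =====
-- stated objective: alternative
-- what changed: A builds the groups left-to-right with a (result, current-row) accumulator pair and a final flush; B keeps the transpose/join stage but traverses the stripped columns in reverse, prepending each value into the head group of the result (and prepending a fresh empty group at each separator), so no pending-row state or final flush exists.
import Mathlib
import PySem

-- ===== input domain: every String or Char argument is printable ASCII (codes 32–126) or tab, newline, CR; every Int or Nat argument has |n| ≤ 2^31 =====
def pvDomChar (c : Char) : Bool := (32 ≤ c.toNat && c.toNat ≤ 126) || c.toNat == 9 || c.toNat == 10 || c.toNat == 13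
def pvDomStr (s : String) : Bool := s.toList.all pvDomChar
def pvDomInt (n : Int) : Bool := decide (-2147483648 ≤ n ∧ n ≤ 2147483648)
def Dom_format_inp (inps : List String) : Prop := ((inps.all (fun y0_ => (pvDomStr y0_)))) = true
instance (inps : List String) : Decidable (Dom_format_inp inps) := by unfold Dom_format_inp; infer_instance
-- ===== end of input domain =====

-- B replaces A's forward accumulator pair by a reverse traversal that prepends into the head
-- group of the result (alternative decomposition; transpose/join stage shared).

-- shared stage of both Pythons: stripped column strings of zip(*inps) (hand port of variadic zip:
-- column j of the rows, j below the minimum row length, so getD never takes its default; exact)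
def pvJoined (inps : List String) : List (List Char) :=
  let rows := inps.map String.toList
  (List.range ((rows.map List.length).min?.getD 0)).map
    (fun j => PySem.Chars.strip (rows.map (fun r => r.getD j ' ')))

-- ===== PORT A =====
def format_inp (inps : List String) : List (List Int) :=
  let joined := pvJoined inps
  let st := joined.foldl
    (fun (acc : List (List Int) × List Int) item =>
      if item ≠ [] then (acc.1, acc.2 ++ [(PySem.Int.ofChars? item).getD 0])
      else (acc.1 ++ [acc.2], ([] : List Int)))
    (([] : List (List Int)), ([] : List Int))
  st.1 ++ [st.2]

-- ===== PORT B =====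
def format_inp_alt (inps : List String) : List (List Int) :=
  let joined := pvJoined inps
  joined.reverse.foldl
    (fun (res : List (List Int)) s =>
      if s ≠ [] then ((PySem.Int.ofChars? s).getD 0 :: res.headD []) :: res.tail
      else ([] : List Int) :: res)
    [[]]

-- ===== PRECONDITION & SPEC =====
-- Pre_ excludes exactly the inputs where some nonempty stripped column is not int-parseable:
-- there Python's int() raises ValueError in A (and in B alike).
def Pre_format_inp (inps : List String) : Prop :=
  ∀ c ∈ pvJoined inps, c ≠ [] → (PySem.Int.ofChars? c).isSome
instance (inps : List String) : Decidable (Pre_format_inp inps) := by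
  unfold Pre_format_inp; infer_instance
def pvWitness_format_inp : List String := ["1 2", "0 3", "4 5"]
def Spec_format_inp (inps : List String) (out : List (List Int)) : Prop := out = format_inp_alt inps
instance (inps : List String) (out : List (List Int)) : Decidable (Spec_format_inp inps out) := by unfold Spec_format_inp; infer_instance

-- ===== CLAIM (what is proved, stated in full; the proofs are below) =====
def Claim_equal_format_inp : Prop := ∀ (inps : List String), Dom_format_inp inps → Pre_format_inp inps → Spec_format_inp inps (format_inp inps)

-- ===== LEMMAS AND PROOFS =====

-- B's reverse-foldl step, named for the proofs
def pvStepB (s : List Char) (res : List (List Int)) : List (List Int) :=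
  if s ≠ [] then ((PySem.Int.ofChars? s).getD 0 :: res.headD []) :: res.tail
  else ([] : List Int) :: res

lemma pvFoldrB_ne_nil (L : List (List Char)) : L.foldr pvStepB [[]] ≠ [] := by
  induction L with
  | nil => simp
  | cons h t ih =>
      simp only [List.foldr_cons, pvStepB]
      split_ifs <;> simp

lemma pvFoldrB_cons (L : List (List Char)) :
    ∃ g r, L.foldr pvStepB [[]] = g :: r := by
  cases hfe : L.foldr pvStepB [[]] with
  | nil => exact absurd hfe (pvFoldrB_ne_nil L)
  | cons g r => exact ⟨g, r, rfl⟩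

lemma pvLoopA_eq (L : List (List Char)) :
    ∀ (res : List (List Int)) (row : List Int),
      (L.foldl
        (fun (acc : List (List Int) × List Int) item =>
          if item ≠ [] then (acc.1, acc.2 ++ [(PySem.Int.ofChars? item).getD 0])
          else (acc.1 ++ [acc.2], ([] : List Int))) (res, row)).1 ++
      [(L.foldl
        (fun (acc : List (List Int) × List Int) item =>
          if item ≠ [] then (acc.1, acc.2 ++ [(PySem.Int.ofChars? item).getD 0])
          else (acc.1 ++ [acc.2], ([] : List Int))) (res, row)).2] =
      res ++ (row ++ (L.foldr pvStepB [[]]).headD []) :: (L.foldr pvStepB [[]]).tail := by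
  induction L with
  | nil => intro res row; simp
  | cons h t ih =>
      intro res row
      simp only [List.foldl_cons, List.foldr_cons, pvStepB]
      by_cases hh : h = []
      · rw [if_neg (by simp [hh]), if_neg (by simp [hh])]
        rw [ih]
        obtain ⟨g, r, hr⟩ := pvFoldrB_cons t
        rw [hr]
        simp
      · rw [if_pos hh, if_pos hh]
        rw [ih]
        simp

-- ===== VERDICT (by name: the statement is the Claim_ definition above) =====
theorem format_inp_spec : Claim_equal_format_inp := by
  intro inps _ _
  unfold Spec_format_inp format_inp format_inp_alt
  rw [List.foldl_reverse]
  have hstep : (pvJoined inps).foldr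
      (fun x y => (fun (res : List (List Int)) s =>
        if s ≠ [] then ((PySem.Int.ofChars? s).getD 0 :: res.headD []) :: res.tail
        else ([] : List Int) :: res) y x) [[]] =
      (pvJoined inps).foldr pvStepB [[]] := rfl
  rw [hstep]
  have hmain := pvLoopA_eq (pvJoined inps) [] []
  simp only [List.nil_append] at hmain
  rw [hmain]
  obtain ⟨g, r, hfe⟩ := pvFoldrB_cons (pvJoined inps)
  rw [hfe]
  simp
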